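-- pv_equiv track=rewrite | github.com/eaculb/jotto | getLegalWords.py | legalWord
-- ===== SOURCE A (Python) =====
-- def legalWord(word):
-- 	if word[-1] == 's':
-- 		return False
-- 	letterCounts = {}
-- 	for letter in word:
-- 		if letter in letterCounts:
-- 			letterCounts[letter] += 1
-- 		else:
-- 			letterCounts[letter] = 1
-- 	for letter in letterCounts:
-- 		if letterCounts[letter] > 1:
-- 			return False
-- 	return True
-- ===== SOURCE B (Python) =====
-- def legalWord(word):
-- 	if word[-1] == 's':
-- 		return False
-- 	prev = None
-- 	for letter in sorted(word):
-- 		if letter == prev: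
-- 			return False
-- 		prev = letter
-- 	return True
-- ===== Notes on version B (the rewrite author's own statement) =====
-- stated objective: alternative
-- what changed: Instead of building a per-letter count dictionary and rescanning it, B sorts the letters and walks the sorted sequence once comparing each letter with its predecessor; duplicates are adjacent after sorting, so no hash container or count table exists at all.
-- outside the precondition, e.g. on legalWord(''): A raises IndexError, B raises IndexError
import Mathlib
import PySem

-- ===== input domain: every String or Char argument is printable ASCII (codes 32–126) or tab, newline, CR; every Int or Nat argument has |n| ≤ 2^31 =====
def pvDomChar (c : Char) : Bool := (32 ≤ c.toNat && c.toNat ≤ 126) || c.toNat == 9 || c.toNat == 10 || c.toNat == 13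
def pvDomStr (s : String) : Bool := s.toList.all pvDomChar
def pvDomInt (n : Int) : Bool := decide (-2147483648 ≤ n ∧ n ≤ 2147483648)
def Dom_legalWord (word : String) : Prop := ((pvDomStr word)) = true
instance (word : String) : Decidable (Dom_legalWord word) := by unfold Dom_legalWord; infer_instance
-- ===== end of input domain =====

-- B replaces A's count dictionary and second scan by sorting the letters and
-- scanning once for an adjacent duplicate (objective: alternative algorithm).

-- ===== PORT A =====
def legalWord (word : String) : Bool :=
  match PySem.List.pyGet? word.toList (-1) with
  | none => false   -- word[-1] raises IndexError on ""; excluded by Pre_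
  | some c =>
    if c = 's' then false
    else
      let letterCounts : PySem.Dict Char Int :=
        word.toList.foldl
          (fun d letter =>
            if d.contains letter then d.insert letter (d.getD letter 0 + 1)
            else d.insert letter 1)
          PySem.Dict.empty
      !(letterCounts.keys.any (fun letter => decide (letterCounts.getD letter 0 > 1)))

-- ===== PORT B =====
-- the 'for letter in sorted(word): if letter == prev: return False; prev = letter' loop
def pvScanAdj : Option Char → List Char → Bool
  | _, [] => true
  | prev, letter :: rest =>
      if some letter = prev then false else pvScanAdj (some letter) rest

def legalWord_alt (word : String) : Bool :=
  match PySem.List.pyGet? word.toList (-1) with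
  | none => false   -- word[-1] raises IndexError on ""; excluded by Pre_
  | some c =>
    if c = 's' then false
    else pvScanAdj none (PySem.List.sorted word.toList (fun x => x) false)

-- ===== PRECONDITION & SPEC =====
-- Pre_ excludes only the empty string, on which A (and B) raise IndexError at word[-1].
def Pre_legalWord (word : String) : Prop := word ≠ ""
instance (word : String) : Decidable (Pre_legalWord word) := by unfold Pre_legalWord; infer_instance
def pvWitness_legalWord : String := "abc"

def Spec_legalWord (word : String) (out : Bool) : Prop := out = legalWord_alt word
instance (word : String) (out : Bool) : Decidable (Spec_legalWord word out) := by unfold Spec_legalWord; infer_instance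

-- ===== CLAIM (what is proved, stated in full; the proofs are below) =====
def Claim_equal_legalWord : Prop := ∀ (word : String), Dom_legalWord word → Pre_legalWord word → Spec_legalWord word (legalWord word)

-- ===== LEMMAS AND PROOFS =====

-- A's counting loop is Counter: the 'else' branch inserts 1 = getD+1 on a missing key.
theorem legalWord_counts_eq_counter (l : List Char) :
    l.foldl
      (fun d letter =>
        if d.contains letter then d.insert letter (d.getD letter 0 + 1)
        else d.insert letter 1)
      PySem.Dict.empty = PySem.Dict.counter l := by
  rw [← PySem.Dict.foldl_insert_getD_add_one_eq_counter]
  congr 1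
  funext d letter
  split_ifs with h
  · rfl
  · rw [PySem.Dict.getD_of_not_contains d 0 (by simpa using h)]
    norm_num

-- A's second loop returns True iff no letter occurs more than once, i.e. Nodup.
theorem legalWord_scan_eq_nodup (l : List Char) :
    (!((PySem.Dict.counter l).keys.any
        (fun letter => decide ((PySem.Dict.counter l).getD letter 0 > 1))))
      = decide l.Nodup := by
  simp only [PySem.Dict.keys_counter, PySem.Dict.getD_counter]
  rcases Bool.eq_false_or_eq_true (decide l.Nodup) with h | h <;> rw [h]
  · have hnd : l.Nodup := of_decide_eq_true h
    rw [List.nodup_iff_count_le_one] at hnd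
    have hany : (PySem.Set.ofList l).any
        (fun letter => decide ((l.count letter : Int) > 1)) = false := by
      rw [List.any_eq_false]
      intro a _
      simpa using hnd a
    rw [hany]; rfl
  · have hnd : ¬ l.Nodup := of_decide_eq_false h
    rw [List.nodup_iff_count_le_one, not_forall] at hnd
    obtain ⟨a, ha⟩ := hnd
    have ha' : 1 < List.count a l := by omega
    have hmem : a ∈ PySem.Set.ofList l := by
      rw [PySem.Set.mem_ofList]
      exact List.count_pos_iff.mp (by omega)
    have hany : (PySem.Set.ofList l).any
        (fun letter => decide ((l.count letter : Int) > 1)) = true :=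
      List.any_eq_true.mpr ⟨a, hmem, by simpa using ha'⟩
    rw [hany]; rfl

theorem pvScanAdj_some_eq_nodup (l : List Char) :
    ∀ p : Char, (p :: l).Pairwise (· ≤ ·) →
      pvScanAdj (some p) l = decide (p :: l).Nodup := by
  induction l with
  | nil => intro p _; simp [pvScanAdj]
  | cons c rest ih =>
    intro p hpw
    rcases List.pairwise_cons.mp hpw with ⟨hp, hrest⟩
    rcases List.pairwise_cons.mp hrest with ⟨hc, _⟩
    by_cases h : c = p
    · simp [pvScanAdj, h]
    · have hnm : p ∉ c :: rest := by
        intro hm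
        rcases List.mem_cons.mp hm with h' | h'
        · exact h h'.symm
        · exact h (le_antisymm (hc p h') (hp c List.mem_cons_self))
      rw [pvScanAdj]
      have : ¬ (some c = some p) := by simp [h]
      rw [if_neg this, ih c hrest]
      have : ((p :: c :: rest).Nodup ↔ (c :: rest).Nodup) := by
        rw [List.nodup_cons]
        exact ⟨fun ⟨_, hn⟩ => hn, fun hn => ⟨hnm, hn⟩⟩
      rw [decide_eq_decide.mpr this]

theorem pvScanAdj_none_eq_nodup (l : List Char) (hs : l.Pairwise (· ≤ ·)) :
    pvScanAdj none l = decide l.Nodup := by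
  cases l with
  | nil => simp [pvScanAdj]
  | cons c rest =>
    rw [pvScanAdj]
    have : ¬ (some c = none) := by simp
    rw [if_neg this]
    exact pvScanAdj_some_eq_nodup rest c hs

-- ===== VERDICT (by name: the statement is the Claim_ definition above) =====
theorem legalWord_spec : Claim_equal_legalWord := by
  intro word _ _
  unfold Spec_legalWord legalWord legalWord_alt
  cases hget : PySem.List.pyGet? word.toList (-1) with
  | none => rfl
  | some c =>
    simp only []
    split_ifs with hc
    · rfl
    · have hperm : (PySem.List.sorted word.toList (fun x => x) false).Perm word.toList :=
        PySem.List.sorted_perm _ _ _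
      have hpw : (PySem.List.sorted word.toList (fun x => x) false).Pairwise (· ≤ ·) := by
        simpa using PySem.List.sorted_pairwise word.toList (fun x => x)
      rw [legalWord_counts_eq_counter, legalWord_scan_eq_nodup,
        pvScanAdj_none_eq_nodup _ hpw, decide_eq_decide.mpr hperm.nodup_iff]
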